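-- pv_equiv track=rewrite | github.com/YNK99/Baekjoon | 프로그래머스/unrated/140108. 문자열 나누기/문자열 나누기.py | solution
-- ===== SOURCE A (Python) =====
-- def solution(s):
--     str_list = ['', 0, 0]
--     answer = 0
--
--     for i in s:
--         if str_list[0] == '':
--             str_list[0] = i
--             str_list[1] += 1
--         else:
--             if str_list[0] == i:
--                 str_list[1] += 1
--             else:
--                 str_list[2] += 1
--             if str_list[1] == str_list[2]:
--                 answer += 1
--                 str_list = ['', 0, 0]
--     if str_list != ['', 0, 0]:
--         answer += 1
--
--     return answer
-- ===== SOURCE B (Python) =====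
-- def solution(s):
--     n = len(s)
--     # Precompute a jump table: nxt[i] = the index just past the segment that starts
--     # at i (first j > i where the #head - #other balance returns to zero), or n.
--     # For head char x, position j ends a segment started at i iff
--     # 2*count_x(s[:j]) - j == 2*count_x(s[:i]) - i, so for each char we scan the
--     # string once backwards, remembering for each value of 2*c - j the closest
--     # position where it occurs.
--     nxt = [n] * n
--     for x in set(s):
--         c = s.count(x)          # count of x in s[:j], maintained as j descends
--         last = {}               # value 2*c - j  ->  nearest position to the right
--         for j in range(n, -1, -1):
--             v = 2 * c - j
--             if j < n and s[j] == x: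
--                 nxt[j] = last.get(v, n)
--             last[v] = j
--             if j > 0 and s[j - 1] == x:
--                 c -= 1
--     # Walk the jump table from the left; each hop is one piece (a trailing
--     # unbalanced piece hops straight to n and is counted the same way).
--     answer = 0
--     i = 0
--     while i < n:
--         answer += 1
--         i = nxt[i]
--     return answer
-- ===== Notes on version B (the rewrite author's own statement) =====
-- stated objective: alternative
-- what changed: B replaces A's left-to-right stateful scan (reference char with two counters, reset at each balance point) by a precomputed jump table: for each distinct character it scans the string once backwards, hashing the prefix invariant 2*count_x(s[:j])-j to find for every position of x the nearest later position with the same value (the segment end), and then simply walks the jump table counting hops.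
import Mathlib
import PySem

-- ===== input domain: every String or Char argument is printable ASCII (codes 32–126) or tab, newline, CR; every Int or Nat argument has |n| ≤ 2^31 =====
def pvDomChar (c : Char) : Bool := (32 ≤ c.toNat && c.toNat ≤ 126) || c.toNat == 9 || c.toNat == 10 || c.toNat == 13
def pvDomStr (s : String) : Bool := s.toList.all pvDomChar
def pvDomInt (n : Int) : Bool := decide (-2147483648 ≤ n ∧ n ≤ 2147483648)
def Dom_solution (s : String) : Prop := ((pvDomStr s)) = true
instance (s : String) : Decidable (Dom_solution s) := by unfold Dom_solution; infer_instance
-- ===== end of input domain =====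

-- B replaces A's stateful left-to-right scan by a precomputed jump table (per
-- distinct character, a backwards hashing pass on the prefix invariant
-- 2*count - position) and then walks the table counting hops; alternative
-- algorithm, not claimed faster.

-- ===== PORT A =====
-- state: (str_list[0] as Option Char ('' = none), str_list[1], str_list[2]) paired with answer
def solutionStep (st : (Option Char × Int × Int) × Int) (i : Char) : (Option Char × Int × Int) × Int :=
  match st with
  | ((none, c1, c2), ans) => ((some i, c1 + 1, c2), ans)
  | ((some f0, c1, c2), ans) =>
    let c1' := if f0 = i then c1 + 1 else c1
    let c2' := if f0 = i then c2 else c2 + 1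
    if c1' = c2' then ((none, 0, 0), ans + 1) else ((some f0, c1', c2'), ans)

def solution (s : String) : Int :=
  let r := s.toList.foldl solutionStep ((none, 0, 0), 0)
  if r.1 ≠ ((none : Option Char), (0 : Int), (0 : Int)) then r.2 + 1 else r.2

-- ===== PORT B =====
-- one iteration of the inner 'for j in range(n, -1, -1)' loop of Source B; state is
-- (nxt, last, c) with c = count of x in s[j:]
def pvBuildStep (l : List Char) (n : Int) (x : Char)
    (st : List Int × PySem.Dict Int Int × Int) (j : Int) :
    List Int × PySem.Dict Int Int × Int :=
  match st with
  | (nxt, last, c) =>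
    let v := 2 * c + j
    let nxt' := if j < n ∧ PySem.List.pyGet? l j = some x
      then PySem.List.pySetD nxt j (last.getD v n) else nxt
    let last' := last.insert v j
    let c' := if 0 < j ∧ PySem.List.pyGet? l (j - 1) = some x then c + 1 else c
    (nxt', last', c')

-- body of 'for x in set(s)': the backwards pass for one character
def pvBuild (l : List Char) (n : Int) (nxt0 : List Int) (x : Char) : List Int :=
  ((PySem.List.pyRange n (-1) (-1)).foldl (pvBuildStep l n x) (nxt0, PySem.Dict.empty, 0)).1

-- the final 'while i < n' walk; fuel (l.length + 1) bounds the hop count, each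
-- hop strictly increases i (proved below); pyGetD's default is never used for
-- in-range i
def pvWalk (nxt : List Int) (n : Int) : Nat → Int → Int → Int
  | 0, _, ans => ans
  | fuel+1, i, ans =>
      if i < n then pvWalk nxt n fuel (PySem.List.pyGetD nxt i n) (ans + 1) else ans

def solution_alt (s : String) : Int :=
  let l := s.toList
  let n : Int := (l.length : Int)
  let nxt := (PySem.Set.ofList l).foldl (pvBuild l n) (List.replicate l.length n)
  pvWalk nxt n (l.length + 1) 0 0

-- ===== PRECONDITION & SPEC =====
def Spec_solution (s : String) (out : Int) : Prop := out = solution_alt s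
instance (s : String) (out : Int) : Decidable (Spec_solution s out) := by unfold Spec_solution; infer_instance

-- ===== CLAIM =====
def Claim_equal_solution : Prop := ∀ (s : String), Dom_solution s → Spec_solution s (solution s)

-- ===== LEMMAS AND PROOFS =====

-- A's scan, restructured for the proof: consume chars while the balance is nonzero
def pvInner (x : Char) : Int → List Char → List Char
  | _, [] => []
  | bal, c :: cs => if bal = 0 then c :: cs else pvInner x (if c = x then bal + 1 else bal - 1) cs

-- number of chars pvInner consumes
def pvFZ (x : Char) : Int → List Char → Nat
  | _, [] => 0
  | bal, c :: cs => if bal = 0 then 0 else pvFZ x (if c = x then bal + 1 else bal - 1) cs + 1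

theorem pvInner_length_le (x : Char) (bal : Int) (l : List Char) :
    (pvInner x bal l).length ≤ l.length := by
  induction l generalizing bal with
  | nil => simp [pvInner]
  | cons c cs ih =>
    simp only [pvInner]
    split
    · simp
    · exact le_trans (ih _) (Nat.le_succ _)

-- segment-count recursion: one count per (possibly trailing) piece
def pvGo : List Char → Int
  | [] => 0
  | c :: cs => 1 + pvGo (pvInner c 1 cs)
termination_by l => l.length
decreasing_by
  exact Nat.lt_succ_of_le (pvInner_length_le _ _ _)

def pvFinish (r : (Option Char × Int × Int) × Int) : Int :=
  if r.1 ≠ ((none : Option Char), (0 : Int), (0 : Int)) then r.2 + 1 else r.2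

-- A = pvGo
theorem pv_main (l : List Char) :
    (∀ ans : Int, pvFinish (l.foldl solutionStep ((none, 0, 0), ans)) = ans + pvGo l) ∧
    (∀ (f0 : Char) (c1 c2 ans : Int), c2 < c1 →
      pvFinish (l.foldl solutionStep ((some f0, c1, c2), ans))
        = ans + 1 + pvGo (pvInner f0 (c1 - c2) l)) := by
  induction l with
  | nil =>
    constructor
    · intro ans; simp [pvFinish, pvGo]
    · intro f0 c1 c2 ans _; simp [pvFinish, pvInner, pvGo]
  | cons c cs ih =>
    obtain ⟨ihTop, ihMain⟩ := ih
    constructor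
    · intro ans
      simp only [List.foldl_cons, solutionStep]
      rw [show (0:Int)+1 = 1 from rfl, ihMain c 1 0 ans (by norm_num),
        show (1:Int) - 0 = 1 from rfl]
      simp only [pvGo]
      ring
    · intro f0 c1 c2 ans hlt
      simp only [List.foldl_cons, solutionStep]
      by_cases hfc : f0 = c
      · simp only [if_pos hfc]
        by_cases heq : c1 + 1 = c2
        · omega
        · simp only [if_neg heq]
          rw [ihMain f0 (c1 + 1) c2 ans (by omega)]
          have hbal : (c1 : Int) - c2 ≠ 0 := by omega
          simp only [pvInner, if_neg hbal, if_pos hfc.symm]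
          rw [show (c1 : Int) + 1 - c2 = c1 - c2 + 1 by ring]
      · simp only [if_neg hfc]
        have hbal : (c1 : Int) - c2 ≠ 0 := by omega
        by_cases heq : c1 = c2 + 1
        · simp only [if_pos heq]
          rw [ihTop (ans + 1)]
          have h0 : (c1 : Int) - c2 - 1 = 0 := by omega
          have hinner : pvInner f0 (c1 - c2) (c :: cs) = cs := by
            simp only [pvInner, if_neg hbal]
            have hne : ¬ (c = f0) := fun h => hfc h.symm
            simp only [if_neg hne, h0]
            cases cs with
            | nil => simp [pvInner]
            | cons d ds => simp [pvInner]
          rw [hinner]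
        · simp only [if_neg heq]
          rw [ihMain f0 c1 (c2 + 1) ans (by omega)]
          have hne : ¬ (c = f0) := fun h => hfc h.symm
          simp only [pvInner, if_neg hbal, if_neg hne]
          rw [show (c1 : Int) - (c2 + 1) = c1 - c2 - 1 by ring]

-- the backwards-pass invariant value: w_x(j) = 2 * count of x in s[j:] + j;
-- a piece starting at i with head x ends at the first j > i with w_x(j) = w_x(i)
def pvW (x : Char) (l : List Char) (j : Nat) : Int := 2 * ((l.drop j).count x : Int) + j

-- the jump target: first j in (i, n] with w_x(j) = w_x(i), else n
def pvF (x : Char) (l : List Char) (i : Nat) : Nat :=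
  (((List.range' (i+1) (l.length - i)).find? (fun j => pvW x l j == pvW x l i))).getD l.length

theorem pvInner_eq_drop (x : Char) (bal : Int) (t : List Char) :
    pvInner x bal t = t.drop (pvFZ x bal t) := by
  induction t generalizing bal with
  | nil => simp [pvInner, pvFZ]
  | cons c cs ih =>
    simp only [pvInner, pvFZ]
    split
    · rfl
    · rw [ih]; rfl

theorem pvFZ_le (x : Char) (bal : Int) (t : List Char) : pvFZ x bal t ≤ t.length := by
  induction t generalizing bal with
  | nil => simp [pvFZ]
  | cons c cs ih =>
    simp only [pvFZ]
    split
    · simp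
    · exact Nat.succ_le_succ (ih _)

-- characterization of pvFZ as the first k with balance zero

theorem pvFZ_char (x : Char) (t : List Char) (bal : Int) :
    pvFZ x bal t =
      ((List.range (t.length + 1)).find?
        (fun k => bal + 2 * (((t.take k).count x : Int)) - k == 0)).getD t.length := by
  induction t generalizing bal with
  | nil =>
    simp only [pvFZ, List.length_nil, List.range_one, List.find?, List.take_nil,
      List.count_nil, Nat.cast_zero, Nat.zero_add]
    cases h : (bal + 2 * (0:Int) - 0 == 0) <;> simp
  | cons c cs ih =>
    have hr : List.range (cs.length + 1 + 1) = 0 :: (List.range (cs.length + 1)).map Nat.succ :=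
      List.range_succ_eq_map
    simp only [pvFZ, List.length_cons, hr]
    by_cases hb : bal = 0
    · subst hb
      rw [List.find?_cons_of_pos (p := fun k => (0:Int) + 2 * ((((c :: cs).take k).count x : Int)) - (k:Int) == 0) (by simp)]
      simp
    · rw [List.find?_cons_of_neg (by simp [hb]), List.find?_map]
      have hfun : ((fun k => bal + 2 * ((((c :: cs).take k).count x : Int)) - (k:Int) == 0) ∘ Nat.succ)
          = (fun k => (if c = x then bal + 1 else bal - 1) + 2 * (((cs.take k).count x : Int)) - (k:Int) == 0) := by
        funext k
        simp only [Function.comp_apply, List.take_succ_cons, List.count_cons, beq_iff_eq]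
        have : bal + 2 * ((((cs.take k).count x + if c = x then 1 else 0 : Nat) : Int)) - ((Nat.succ k : Nat):Int)
            = (if c = x then bal + 1 else bal - 1) + 2 * (((cs.take k).count x : Int)) - (k:Int) := by
          split <;> push_cast <;> ring
        rw [this]
      rw [if_neg hb, hfun, ih]
      cases (List.range (cs.length + 1)).find?
          (fun k => (if c = x then bal + 1 else bal - 1) + 2 * (((cs.take k).count x : Int)) - (k:Int) == 0) <;> simp

theorem pvF_eq (x : Char) (l : List Char) (i : Nat) (h : i < l.length)
    (hx : l[i] = x) :
    pvF x l i = i + 1 + pvFZ x 1 (l.drop (i+1)) := by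
  have ht : (l.drop (i+1)).length = l.length - (i+1) := by simp
  have hn : l.length - i = (l.drop (i+1)).length + 1 := by omega
  have hdi : l.drop i = x :: l.drop (i+1) := by
    rw [List.drop_eq_getElem_cons h, hx]
  unfold pvF
  rw [hn, List.range'_eq_map_range, List.find?_map]
  have hfun : ((fun j => pvW x l j == pvW x l i) ∘ (i + 1 + ·))
      = (fun k => (1:Int) + 2 * ((((l.drop (i+1)).take k).count x : Int)) - k == 0) := by
    funext k
    simp only [Function.comp_apply]
    have hsplit : (l.drop (i+1)).count x
        = ((l.drop (i+1)).take k).count x + ((l.drop (i+1)).drop k).count x := by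
      conv_lhs => rw [← List.take_append_drop k (l.drop (i+1))]
      rw [List.count_append]
    have hdd : (l.drop (i+1)).drop k = l.drop (i + 1 + k) := by
      rw [List.drop_drop]
    have h1 : pvW x l i = 2 * (1 + ((l.drop (i+1)).count x : Int)) + i := by
      unfold pvW; rw [hdi]; rw [List.count_cons_self]; push_cast; ring
    have h2 : pvW x l (i + 1 + k) = 2 * (((l.drop (i+1)).drop k).count x : Int) + (i + 1 + k) := by
      unfold pvW; rw [hdd]; push_cast; ring
    rw [Bool.eq_iff_iff, beq_iff_eq, beq_iff_eq, h1, h2, hsplit]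
    push_cast
    constructor <;> intro <;> omega
  rw [hfun, pvFZ_char]
  cases (List.range ((l.drop (i+1)).length + 1)).find?
      (fun k => (1:Int) + 2 * ((((l.drop (i+1)).take k).count x : Int)) - k == 0) <;> simp <;> omega

-- one iteration of the backwards pass, characterized
theorem pvStep_eq (l : List Char) (x : Char) (m : Nat) (hm : m ≤ l.length)
    (nxt : List Int) (last : PySem.Dict Int Int) (hlen : nxt.length = l.length)
    (hlast : ∀ v : Int, last.get? v =
      ((List.range' (m+1) (l.length - m)).find? (fun j => pvW x l j == v)).map (fun j => (j : Int))) :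
    (pvBuildStep l (l.length : Int) x (nxt, last, ((l.drop m).count x : Int)) ((m : Int))).1.length = l.length ∧
    (∀ j : Nat, ∀ _hj : j < l.length,
      (pvBuildStep l (l.length : Int) x (nxt, last, ((l.drop m).count x : Int)) ((m : Int))).1[j]? =
        if j = m ∧ l[j]'(by omega) = x then some ((pvF x l j : Int)) else nxt[j]?) ∧
    (∀ v : Int, (pvBuildStep l (l.length : Int) x (nxt, last, ((l.drop m).count x : Int)) ((m : Int))).2.1.get? v =
      ((List.range' m (l.length - m + 1)).find? (fun j => pvW x l j == v)).map (fun j => (j : Int))) ∧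
    ((pvBuildStep l (l.length : Int) x (nxt, last, ((l.drop m).count x : Int)) ((m : Int))).2.2 =
      if 0 < m then ((l.drop (m-1)).count x : Int) else ((l.drop m).count x : Int)) := by
  have hv0 : 2 * ((l.drop m).count x : Int) + (m : Int) = pvW x l m := rfl
  have hgetD : last.getD (pvW x l m) (l.length : Int) = ((pvF x l m : Nat) : Int) := by
    rw [PySem.Dict.getD_eq_get?_getD, hlast (pvW x l m)]
    unfold pvF
    cases (List.range' (m+1) (l.length - m)).find? (fun j => pvW x l j == pvW x l m) <;> simp
  constructor
  · -- length
    simp only [pvBuildStep]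
    split
    · simp [hlen]
    · exact hlen
  constructor
  · -- nxt entries
    intro j hj
    simp only [pvBuildStep, hv0, hgetD]
    by_cases hc : ((m : Int) < (l.length : Int) ∧ PySem.List.pyGet? l (m : Int) = some x)
    · obtain ⟨hc1, hc2⟩ := hc
      have hmlt : m < l.length := by exact_mod_cast hc1
      have hlm : l[m]'hmlt = x := by
        rw [PySem.List.pyGet?_natCast] at hc2
        rw [List.getElem?_eq_getElem hmlt] at hc2
        exact Option.some.inj hc2
      rw [if_pos ⟨hc1, hc2⟩]
      simp only [PySem.List.pySetD_natCast]
      by_cases hjm : j = m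
      · subst hjm
        rw [List.getElem?_set_self (by omega), if_pos ⟨rfl, hlm⟩]
      · rw [List.getElem?_set_ne (by omega)]
        rw [if_neg (by tauto)]
    · rw [if_neg hc]
      have : ¬ (j = m ∧ l[j]'(by omega) = x) := by
        rintro ⟨rfl, hx2⟩
        exact hc ⟨by exact_mod_cast hj, by
          rw [PySem.List.pyGet?_natCast, List.getElem?_eq_getElem hj, hx2]⟩
      rw [if_neg this]
  constructor
  · -- last entries
    intro v
    simp only [pvBuildStep, hv0]
    rw [PySem.Dict.get?_insert]
    rw [show l.length - m + 1 = (l.length - m) + 1 from rfl, List.range'_succ]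
    by_cases hv : v = pvW x l m
    · rw [if_pos hv, List.find?_cons_of_pos (by simp [hv])]; simp
    · rw [if_neg hv, List.find?_cons_of_neg (by simp [beq_iff_eq]; exact fun h => hv h.symm), hlast v]
  · -- counter
    simp only [pvBuildStep]
    cases m with
    | zero => simp
    | succ m' =>
      have hm' : m' < l.length := by omega
      have hdrop : l.drop m' = l[m']'hm' :: l.drop (m'+1) := List.drop_eq_getElem_cons hm'
      have hpos : (0:Int) < ((m'+1 : Nat) : Int) := by push_cast; omega
      have hidx : ((m'+1 : Nat) : Int) - 1 = (m' : Int) := by push_cast; ring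
      by_cases hx' : l[m']'hm' = x
      · rw [if_pos ⟨hpos, by rw [hidx, PySem.List.pyGet?_natCast, List.getElem?_eq_getElem hm', hx']⟩]
        simp only [Nat.succ_sub_one, if_pos (Nat.succ_pos m')]
        rw [hdrop, hx', List.count_cons_self]
        push_cast; ring
      · rw [if_neg (by
          rintro ⟨-, hg⟩
          rw [hidx, PySem.List.pyGet?_natCast, List.getElem?_eq_getElem hm'] at hg
          exact hx' (Option.some.inj hg))]
        simp only [Nat.succ_sub_one, if_pos (Nat.succ_pos m')]
        rw [hdrop, List.count_cons_of_ne (by simp [hx'])]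


theorem pvBuild_aux (l : List Char) (x : Char) (m : Nat) (hm : m ≤ l.length) :
    ∀ (nxt : List Int) (last : PySem.Dict Int Int), nxt.length = l.length →
    (∀ v : Int, last.get? v =
      ((List.range' (m+1) (l.length - m)).find? (fun j => pvW x l j == v)).map (fun j => (j : Int))) →
    ((PySem.List.pyRange (m : Int) (-1) (-1)).foldl (pvBuildStep l (l.length : Int) x)
        (nxt, last, ((l.drop m).count x : Int))).1.length = l.length ∧
    ∀ j : Nat, ∀ _hj : j < l.length,
      ((PySem.List.pyRange (m : Int) (-1) (-1)).foldl (pvBuildStep l (l.length : Int) x)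
          (nxt, last, ((l.drop m).count x : Int))).1[j]? =
        if j ≤ m ∧ l[j]'(by omega) = x then some ((pvF x l j : Int)) else nxt[j]? := by
  induction m with
  | zero =>
    intro nxt last hlen hlast
    rw [PySem.List.pyRange_neg_one_cons (by norm_num),
      PySem.List.pyRange_neg_one_eq_nil (by norm_num)]
    simp only [List.foldl_cons, List.foldl_nil]
    obtain ⟨ha, hb, -, -⟩ := pvStep_eq l x 0 (by omega) nxt last hlen hlast
    refine ⟨ha, fun j hj => ?_⟩
    rw [hb j hj]
    congr 1
    simp
  | succ m' ih =>
    intro nxt last hlen hlast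
    rw [PySem.List.pyRange_neg_one_cons (by push_cast; omega)]
    simp only [List.foldl_cons]
    obtain ⟨ha, hb, hc, hd⟩ := pvStep_eq l x (m'+1) hm nxt last hlen hlast
    rcases hE : pvBuildStep l (l.length : Int) x (nxt, last, ((l.drop (m'+1)).count x : Int)) (((m'+1 : Nat) : Int))
      with ⟨nxt1, last1, c1⟩
    rw [hE] at ha hb hc hd
    simp only [Nat.succ_sub_one, if_pos (Nat.succ_pos m')] at hd
    have hrange : ((m'+1 : Nat) : Int) - 1 = ((m' : Nat) : Int) := by push_cast; ring
    rw [hrange, hd]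
    have hlast1 : ∀ v : Int, last1.get? v =
        ((List.range' (m'+1) (l.length - m')).find? (fun j => pvW x l j == v)).map (fun j => (j : Int)) := by
      intro v
      have := hc v
      rwa [show l.length - (m'+1) + 1 = l.length - m' by omega] at this
    obtain ⟨hA, hB⟩ := ih (by omega) nxt1 last1 ha hlast1
    refine ⟨hA, fun j hj => ?_⟩
    rw [hB j hj, hb j hj]
    by_cases h1 : l[j]'hj = x
    · by_cases h2 : j ≤ m'
      · rw [if_pos ⟨h2, h1⟩, if_pos ⟨by omega, h1⟩]
      · by_cases h3 : j = m' + 1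
        · rw [if_neg (by omega), if_pos ⟨h3, h1⟩, if_pos ⟨by omega, h1⟩]
        · rw [if_neg (by omega), if_neg (by tauto), if_neg (by omega)]
    · rw [if_neg (by tauto), if_neg (by tauto), if_neg (by tauto)]

theorem pvBuild_spec (l : List Char) (x : Char) (nxt0 : List Int)
    (h0 : nxt0.length = l.length) :
    (pvBuild l (l.length : Int) nxt0 x).length = l.length ∧
    ∀ j : Nat, ∀ _hj : j < l.length,
      (pvBuild l (l.length : Int) nxt0 x)[j]? =
        if l[j]'(by omega) = x then some ((pvF x l j : Int)) else nxt0[j]? := by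
  have hempty : ∀ v : Int, (PySem.Dict.empty : PySem.Dict Int Int).get? v =
      ((List.range' (l.length+1) (l.length - l.length)).find? (fun j => pvW x l j == v)).map (fun j => (j : Int)) := by
    intro v
    simp [PySem.Dict.get?_empty]
  have h := pvBuild_aux l x l.length le_rfl nxt0 PySem.Dict.empty h0 hempty
  unfold pvBuild
  rw [show (0 : Int) = (((l.drop l.length).count x : Nat) : Int) by simp]
  refine ⟨h.1, fun j hj => ?_⟩
  rw [h.2 j hj]
  congr 1
  simp [Nat.le_of_lt hj]



theorem pvOuter_spec (l : List Char) (xs : List Char) (nxt0 : List Int)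
    (h0 : nxt0.length = l.length) :
    (xs.foldl (pvBuild l (l.length : Int)) nxt0).length = l.length ∧
    ∀ j : Nat, ∀ _hj : j < l.length,
      (xs.foldl (pvBuild l (l.length : Int)) nxt0)[j]? =
        if l[j]'(by omega) ∈ xs then some ((pvF (l[j]'(by omega)) l j : Int)) else nxt0[j]? := by
  induction xs generalizing nxt0 with
  | nil =>
    refine ⟨h0, fun j hj => ?_⟩
    simp
  | cons x rest ih =>
    simp only [List.foldl_cons]
    obtain ⟨h1, h2⟩ := pvBuild_spec l x nxt0 h0
    obtain ⟨hA, hB⟩ := ih (pvBuild l (l.length : Int) nxt0 x) h1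
    refine ⟨hA, fun j hj => ?_⟩
    rw [hB j hj, h2 j hj]
    by_cases hr : l[j]'hj ∈ rest
    · rw [if_pos hr, if_pos (List.mem_cons_of_mem x hr)]
    · rw [if_neg hr]
      by_cases hx : l[j]'hj = x
      · rw [if_pos hx, if_pos (by rw [hx]; exact List.mem_cons_self), hx]
      · rw [if_neg hx, if_neg (by simp [hx, hr])]

theorem pvF_bounds (l : List Char) (i : Nat) (h : i < l.length) :
    i + 1 ≤ pvF (l[i]'h) l i ∧ pvF (l[i]'h) l i ≤ l.length := by
  rw [pvF_eq (l[i]'h) l i h rfl]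
  have := pvFZ_le (l[i]'h) 1 (l.drop (i+1))
  simp only [List.length_drop] at this
  omega

theorem pvWalk_spec (l : List Char) (nxt : List Int)
    (hnxt : ∀ j : Nat, ∀ _hj : j < l.length, nxt[j]? = some ((pvF (l[j]'(by omega)) l j : Int))) :
    ∀ (fuel : Nat) (i : Nat) (ans : Int), l.length - i < fuel → i ≤ l.length →
      pvWalk nxt (l.length : Int) fuel (i : Int) ans = ans + pvGo (l.drop i) := by
  intro fuel
  induction fuel with
  | zero => intro i ans hf hi; omega
  | succ f ih =>
    intro i ans hf hi
    by_cases hlt : i < l.length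
    · have hc : ((i : Int) < (l.length : Int)) := by exact_mod_cast hlt
      simp only [pvWalk, if_pos hc]
      rw [PySem.List.pyGetD_natCast, List.getD_eq_getElem?_getD, hnxt i hlt]
      simp only [Option.getD_some]
      obtain ⟨hb1, hb2⟩ := pvF_bounds l i hlt
      rw [ih (pvF (l[i]'hlt) l i) (ans + 1) (by omega) (by omega)]
      have hdrop : l.drop i = (l[i]'hlt) :: l.drop (i+1) := List.drop_eq_getElem_cons hlt
      rw [hdrop]
      have hgo : pvGo ((l[i]'hlt) :: l.drop (i+1)) = 1 + pvGo (pvInner (l[i]'hlt) 1 (l.drop (i+1))) := by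
        rw [pvGo]
      rw [hgo, pvInner_eq_drop, List.drop_drop, ← pvF_eq (l[i]'hlt) l i hlt rfl]
      ring
    · have hieq : i = l.length := by omega
      have hc : ¬ ((i : Int) < (l.length : Int)) := by exact_mod_cast not_lt.mpr (by omega)
      simp only [pvWalk, if_neg hc]
      rw [hieq, List.drop_length]
      simp [pvGo]

-- ===== VERDICT =====
theorem solution_spec : Claim_equal_solution := by
  intro s _
  unfold Spec_solution solution solution_alt
  have hA := (pv_main s.toList).1 0
  unfold pvFinish at hA
  set l := s.toList with hl
  obtain ⟨hlen, hspec⟩ := pvOuter_spec l (PySem.Set.ofList l)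
    (List.replicate l.length ((l.length : Int))) (by simp)
  have hwalk := pvWalk_spec l ((PySem.Set.ofList l).foldl (pvBuild l (l.length : Int)) (List.replicate l.length ((l.length : Int)))) (fun j hj => by
      rw [hspec j hj, if_pos]
      exact (PySem.Set.mem_ofList _ _).mpr (l.getElem_mem hj))
    (l.length + 1) 0 0 (by omega) (by omega)
  simp only [Nat.cast_zero, List.drop_zero] at hwalk
  rw [hwalk]
  simpa using hA
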